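-- pv_equiv track=rewrite | github.com/dPfla0130/codingtest_Python | codingtest/202009/사전순 부분문자열.py | solution
-- ===== SOURCE A (Python) =====
-- def solution(s):
--     stack = []
--
--     for ch in s:
--         while stack and stack[-1] < ch:
--             stack.pop()
--         stack.append(ch)
--     answer = ''.join(stack)
--     return answer
-- ===== SOURCE B (Python) =====
-- def solution(s):
--     best = []
--     mx = None
--     for ch in reversed(s):
--         if mx is None or ch >= mx:
--             best.append(ch)
--             mx = ch
--     return ''.join(reversed(best))
-- ===== Notes on version B (the rewrite author's own statement) =====
-- stated objective: faster
-- what changed: Replaced A's left-to-right monotonic stack (push + pop-while-smaller) by a single right-to-left pass that keeps a character iff it is >= the running maximum of the suffix to its right, then reverses the collected characters.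
import Mathlib
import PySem

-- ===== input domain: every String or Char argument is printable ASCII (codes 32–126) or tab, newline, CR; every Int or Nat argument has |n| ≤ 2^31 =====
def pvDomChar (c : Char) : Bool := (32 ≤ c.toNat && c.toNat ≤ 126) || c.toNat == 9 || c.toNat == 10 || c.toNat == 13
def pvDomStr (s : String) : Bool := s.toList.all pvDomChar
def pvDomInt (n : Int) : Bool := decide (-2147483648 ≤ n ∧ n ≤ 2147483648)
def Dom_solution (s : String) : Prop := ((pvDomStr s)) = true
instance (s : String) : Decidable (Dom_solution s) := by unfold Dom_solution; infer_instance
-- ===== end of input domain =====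

-- B replaces A's left-to-right monotonic stack by one right-to-left pass keeping a running maximum (alternative decomposition, same cost).

-- ===== PORT A =====
-- the stack is held top-at-head (Python's stack[-1] is the head); 'while stack and stack[-1] < ch: stack.pop()'
def popLoop (stack : List Char) (ch : Char) : List Char :=
  match stack with
  | [] => []
  | top :: rest => if top < ch then popLoop rest ch else top :: rest

-- one iteration of A's for-loop: pop-while, then append (push = cons on the top-at-head list)
def astep (stack : List Char) (ch : Char) : List Char := ch :: popLoop stack ch

-- ''.join(stack) joins bottom-to-top, i.e. the reverse of the top-at-head list
def solution (s : String) : String :=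
  String.mk ((s.toList.foldl astep []).reverse)

-- ===== PORT B =====
-- state = (mx, best); one iteration of B's loop over reversed(s)
def bstep (st : Option Char × List Char) (ch : Char) : Option Char × List Char :=
  match st.1 with
  | none => (some ch, st.2 ++ [ch])
  | some mx => if mx ≤ ch then (some ch, st.2 ++ [ch]) else st

-- ''.join(reversed(best))
def solution_alt (s : String) : String :=
  String.mk ((s.toList.reverse.foldl bstep (none, [])).2.reverse)

-- ===== PRECONDITION & SPEC =====
def Spec_solution (s : String) (out : String) : Prop := out = solution_alt s
instance (s : String) (out : String) : Decidable (Spec_solution s out) := by unfold Spec_solution; infer_instance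

-- ===== CLAIM (what is proved, stated in full; the proofs are below) =====
def Claim_equal_solution : Prop := ∀ (s : String), Dom_solution s → Spec_solution s (solution s)

-- ===== LEMMAS AND PROOFS =====

-- maximum character of a list (⟨0⟩ as bottom; no character is below it)
def mChar (l : List Char) : Char := l.foldr max ⟨0, by decide⟩

def dropLt (l : List Char) (c : Char) : List Char := l.dropWhile (fun x => decide (x < c))

theorem popLoop_eq_dropLt (stack : List Char) (ch : Char) :
    popLoop stack ch = dropLt stack ch := by
  induction stack with
  | nil => rfl
  | cons a t ih =>
    simp only [popLoop, dropLt, List.dropWhile]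
    by_cases h : a < ch <;> simp [h, ih, dropLt]

theorem char_zero_le (x : Char) : (⟨0, by decide⟩ : Char) ≤ x := by
  rw [Char.le_def]; exact Nat.zero_le _

theorem dropLt_cons_lt {a c : Char} (t : List Char) (h : a < c) :
    dropLt (a :: t) c = dropLt t c := by
  simp [dropLt, List.dropWhile, h]

theorem dropLt_cons_ge {a c : Char} (t : List Char) (h : ¬ a < c) :
    dropLt (a :: t) c = a :: t := by
  simp [dropLt, List.dropWhile, h]

theorem dropLt_bot (rs : List Char) : dropLt rs (⟨0, by decide⟩ : Char) = rs := by
  cases rs with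
  | nil => rfl
  | cons a t => exact dropLt_cons_ge t (not_lt.mpr (char_zero_le a))

theorem dropLt_dropLt (rs : List Char) (c d : Char) (h : c ≤ d) :
    dropLt (dropLt rs c) d = dropLt rs d := by
  induction rs with
  | nil => rfl
  | cons a t ih =>
    by_cases ha : a < c
    · rw [dropLt_cons_lt t ha, dropLt_cons_lt t (lt_of_lt_of_le ha h), ih]
    · rw [dropLt_cons_ge t ha]

theorem mChar_cons (c : Char) (l : List Char) : mChar (c :: l) = max c (mChar l) := rfl

theorem astep_eq (t : List Char) (c : Char) : astep t c = c :: dropLt t c := by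
  simp [astep, popLoop_eq_dropLt]

-- the stack after processing l from an arbitrary start state rs
theorem foldl_astep (l : List Char) : ∀ rs : List Char,
    l.foldl astep rs = l.foldl astep [] ++ dropLt rs (mChar l) := by
  induction l with
  | nil => intro rs; simp [mChar, dropLt_bot]
  | cons c l ih =>
    intro rs
    rw [List.foldl_cons, List.foldl_cons, astep_eq, astep_eq,
        ih (c :: dropLt rs c), ih (c :: dropLt [] c), mChar_cons]
    by_cases h : c < mChar l
    · rw [dropLt_cons_lt _ h, dropLt_cons_lt _ h, dropLt_dropLt rs c (mChar l) (le_of_lt h),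
          max_eq_right (le_of_lt h)]
      simp [dropLt]
    · rw [dropLt_cons_ge _ h, dropLt_cons_ge _ h, max_eq_left (not_lt.mp h)]
      simp [dropLt]

theorem core_cons (c : Char) (l : List Char) :
    (c :: l).foldl astep [] = l.foldl astep [] ++ dropLt [c] (mChar l) := by
  have h : (c :: l).foldl astep [] = l.foldl astep (c :: dropLt [] c) := by
    rw [List.foldl_cons, astep_eq]
  rw [h]
  exact foldl_astep l (c :: dropLt [] c)

def mxOpt (l : List Char) : Option Char :=
  match l with
  | [] => none
  | _ :: _ => some (mChar l)

-- B's loop state after consuming l.reverse equals (max of l, A's final stack on l)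
theorem foldl_bstep (l : List Char) :
    l.reverse.foldl bstep (none, []) = (mxOpt l, l.foldl astep []) := by
  induction l with
  | nil => rfl
  | cons c l ih =>
    rw [List.reverse_cons, List.foldl_append, ih,
        show List.foldl bstep (mxOpt l, List.foldl astep [] l) [c]
           = bstep (mxOpt l, List.foldl astep [] l) c from rfl]
    cases l with
    | nil => simp [bstep, mxOpt, astep, popLoop, mChar, max_eq_left (char_zero_le c)]
    | cons d l' =>
      simp only [mxOpt, bstep]
      by_cases h : mChar (d :: l') ≤ c
      · rw [if_pos h, core_cons c (d :: l'), dropLt_cons_ge [] (not_lt.mpr h),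
            mChar_cons c (d :: l'), max_eq_left h]
      · rw [if_neg h, core_cons c (d :: l'), dropLt_cons_lt [] (not_le.mp h),
            mChar_cons c (d :: l'), max_eq_right (le_of_lt (not_le.mp h))]
        simp [dropLt]

-- ===== VERDICT (by name: the statement is the Claim_ definition above) =====
theorem solution_spec : Claim_equal_solution := by
  intro s _
  unfold Spec_solution solution solution_alt
  rw [foldl_bstep]
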